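-- pv_equiv track=rewrite | github.com/LeMalk/katas | Closest To Zero/closest_to_zero.py | closest_to_zero_word
-- ===== SOURCE A (Python) =====
-- def closest_to_zero_word(words):
--     target = "zero"
--     target_set = set(target)
--
--     def is_close(word):
--         return set(word) == target_set
--
--     def similarity(word):
--         return sum(1 for a, b in zip(word, target) if a == b)
--
--     closest_word = None
--     for word in words:
--         if is_close(word):
--             if (closest_word is None or
--                 len(word) < len(closest_word) or
--                 (len(word) == len(closest_word) and similarity(word) > similarity(closest_word))):
--                 closest_word = word
--     return closest_word
-- ===== SOURCE B (Python) =====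
-- def closest_to_zero_word(words):
--     target = "zero"
--     candidates = [w for w in words if set(w) == set(target)]
--     if not candidates:
--         return None
--
--     def key(w):
--         return (len(w), -sum(1 for a, b in zip(w, target) if a == b))
--
--     return sorted(candidates, key=key)[0]
-- ===== Notes on version B (the rewrite author's own statement) =====
-- stated objective: simpler
-- what changed: Replaced the running-best single scan with filter-candidates then stable-sort by the key (len, -similarity) and take the first element; sort stability reproduces A's first-wins tie-breaking.
import Mathlib
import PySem

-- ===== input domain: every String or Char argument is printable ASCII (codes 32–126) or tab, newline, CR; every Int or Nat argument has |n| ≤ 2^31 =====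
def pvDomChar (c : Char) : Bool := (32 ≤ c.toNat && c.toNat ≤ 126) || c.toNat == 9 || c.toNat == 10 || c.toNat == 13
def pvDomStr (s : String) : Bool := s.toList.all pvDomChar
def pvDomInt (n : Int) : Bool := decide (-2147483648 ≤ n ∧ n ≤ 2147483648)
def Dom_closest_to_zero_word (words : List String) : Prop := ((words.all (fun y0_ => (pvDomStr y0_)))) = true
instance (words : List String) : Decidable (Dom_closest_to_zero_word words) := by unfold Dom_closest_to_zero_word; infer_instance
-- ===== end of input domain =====

-- B replaces A's running-best single scan by filter-then-stable-sort-then-head (simpler decomposition; same return value).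

-- ===== PORT A =====
def pvIsCloseA (word : String) : Bool :=
  PySem.Set.equal (PySem.Set.ofList word.toList) (PySem.Set.ofList "zero".toList)

def pvSimilarityA (word : String) : Int :=
  (List.zip word.toList "zero".toList).foldl (fun s p => if p.1 = p.2 then s + 1 else s) 0

def closest_to_zero_word (words : List String) : Option String :=
  words.foldl
    (fun closest word =>
      if pvIsCloseA word then
        match closest with
        | none => some word
        | some b =>
            if PySem.Str.len word < PySem.Str.len b ∨
               (PySem.Str.len word = PySem.Str.len b ∧ pvSimilarityA word > pvSimilarityA b) then
              some word
            else some b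
      else closest)
    none

-- ===== PORT B =====
def pvIsCloseB (w : String) : Bool :=
  PySem.Set.equal (PySem.Set.ofList w.toList) (PySem.Set.ofList "zero".toList)

def pvSimB (w : String) : Int :=
  (List.zip w.toList "zero".toList).foldl (fun s p => if p.1 = p.2 then s + 1 else s) 0

def closest_to_zero_word_alt (words : List String) : Option String :=
  let candidates := words.filter (fun w => pvIsCloseB w)
  (PySem.List.sorted2 candidates (fun w => PySem.Str.len w) (fun w => -pvSimB w)).head?

-- ===== PRECONDITION & SPEC =====
def Spec_closest_to_zero_word (words : List String) (out : Option String) : Prop := out = closest_to_zero_word_alt words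
instance (words : List String) (out : Option String) : Decidable (Spec_closest_to_zero_word words out) := by unfold Spec_closest_to_zero_word; infer_instance

-- ===== CLAIM (what is proved, stated in full; the proofs are below) =====
def Claim_equal_closest_to_zero_word : Prop := ∀ (words : List String), Dom_closest_to_zero_word words → Spec_closest_to_zero_word words (closest_to_zero_word words)

-- ===== LEMMAS AND PROOFS =====

-- head of an insertion: the new element wins iff `before x (old head)`.
theorem head?_insertBy {α : Type} (before : α → α → Bool) (x : α) (acc : List α) :
    (PySem.List.insertBy before x acc).head? =
      match acc.head? with
      | none => some x
      | some y => if before x y then some x else some y := by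
  cases acc with
  | nil => rfl
  | cons y ys => simp [PySem.List.insertBy]; split <;> simp

-- head of the insertion-sort fold = running-best fold with the same `before`.
theorem head?_foldl_insertBy {α : Type} (before : α → α → Bool) (l : List α) (acc : List α) :
    (l.foldl (fun acc x => PySem.List.insertBy before x acc) acc).head? =
      l.foldl
        (fun best x =>
          match best with
          | none => some x
          | some b => if before x b then some x else some b)
        acc.head? := by
  induction l generalizing acc with
  | nil => rfl
  | cons x xs ih =>
      simp only [List.foldl_cons, ih, head?_insertBy]

theorem closest_to_zero_word_spec : Claim_equal_closest_to_zero_word := by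
  unfold Claim_equal_closest_to_zero_word
  intro words _
  unfold Spec_closest_to_zero_word closest_to_zero_word closest_to_zero_word_alt
  simp only [PySem.List.sorted2, head?_foldl_insertBy, List.head?_nil]
  rw [← PySem.List.foldl_if_eq_foldl_filter (fun w => pvIsCloseB w)]
  have hsim : pvSimilarityA = pvSimB := rfl
  have hclose : pvIsCloseA = pvIsCloseB := rfl
  rw [hsim, hclose]
  congr 1
  funext best w
  cases best with
  | none => simp
  | some b =>
      simp only [PySem.Str.len_eq, gt_iff_lt, Bool.false_eq_true, if_false,
        Bool.or_eq_true, Bool.and_eq_true, Bool.not_eq_true', decide_eq_true_eq,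
        decide_eq_false_iff_not, not_lt, neg_lt_neg_iff]
      split_ifs <;> first | rfl | omega
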